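-- pv_equiv track=rewrite | github.com/BrendanLeber/adventofcode | 2016/02-bathroom_security/solve.py | solve
-- ===== SOURCE A (Python) =====
-- from copy import deepcopy
-- from dataclasses import dataclass
-- from typing import List, Tuple
--
-- @dataclass
-- class Position:
--     row: int = 0
--     column: int = 0
--
-- KEYPAD: List[List[str]] = [
--     [None, None, None, None, None, None, None],  # type: ignore
--     [None, None, None, "1", None, None, None],  # type: ignore
--     [None, None, "2", "3", "4", None, None],  # type: ignore
--     [None, "5", "6", "7", "8", "9", None],  # type: ignore
--     [None, None, "A", "B", "C", None, None],  # type: ignore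
--     [None, None, None, "D", None, None, None],  # type: ignore
--     [None, None, None, None, None, None, None],  # type: ignore
-- ]
--
-- def pos_to_key(pos: Position) -> str:
--     return "123456789"[pos.row * 3 + pos.column]
--
-- def update_pos(move: str, pos: Position) -> Position:
--     new_pos = deepcopy(pos)
--     if move == "U":
--         new_pos.row -= 1
--     elif move == "D":
--         new_pos.row += 1
--     elif move == "L":
--         new_pos.column -= 1
--     elif move == "R":
--         new_pos.column += 1
--     else:
--         raise ValueError(f"invalid move {move}")
--     return new_pos
--
-- def solve(codes: List[List[str]], verbose=False) -> Tuple[str, str]: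
--     pos: Position = Position(row=1, column=1)  # start at '5'
--     keys: List[str] = []
--     for code in codes:
--         for move in code:
--             if move == "U":
--                 if pos.row > 0:
--                     pos.row -= 1
--             elif move == "D":
--                 if pos.row < 2:
--                     pos.row += 1
--             elif move == "R":
--                 if pos.column < 2:
--                     pos.column += 1
--             elif move == "L":
--                 if pos.column > 0:
--                     pos.column -= 1
--             else:
--                 raise ValueError(f"invalid move {move}")
--         keys.append(pos_to_key(pos))
--     one: str = "".join(keys)
--
--     pos = Position(row=3, column=1)  # start at '5'
--     keys = []
--     for code in codes:
--         for move in code: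
--             new_pos = update_pos(move, pos)
--             key = KEYPAD[new_pos.row][new_pos.column]
--             if key:
--                 pos = new_pos
--         keys.append(KEYPAD[pos.row][pos.column])
--     two: str = "".join(keys)
--
--     return (one, two)
-- ===== SOURCE B (Python) =====
-- # B: precomputed transition tables keyed by key character; tracks the current key instead of coordinates.
-- from typing import List, Tuple
--
-- _LAYOUT1 = ["123", "456", "789"]
-- _LAYOUT2 = ["  1  ", " 234 ", "56789", " ABC ", "  D  "]
-- _DELTAS = {"U": (-1, 0), "D": (1, 0), "L": (0, -1), "R": (0, 1)}
--
--
-- def _build_table(layout):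
--     spots = {}
--     for r, row in enumerate(layout):
--         for c, ch in enumerate(row):
--             if ch != " ":
--                 spots[ch] = (r, c)
--     table = {}
--     for ch, (r, c) in spots.items():
--         sub = {}
--         for move, (dr, dc) in _DELTAS.items():
--             nr, nc = r + dr, c + dc
--             if 0 <= nr < len(layout) and 0 <= nc < len(layout[nr]) and layout[nr][nc] != " ":
--                 sub[move] = layout[nr][nc]
--             else:
--                 sub[move] = ch
--         table[ch] = sub
--     return table
--
--
-- _TABLE1 = _build_table(_LAYOUT1)
-- _TABLE2 = _build_table(_LAYOUT2)
--
--
-- def _run(table, codes):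
--     cur = "5"
--     out = []
--     for code in codes:
--         for move in code:
--             if move not in table[cur]:
--                 raise ValueError(f"invalid move {move}")
--             cur = table[cur][move]
--         out.append(cur)
--     return "".join(out)
--
--
-- def solve(codes: List[List[str]], verbose=False) -> Tuple[str, str]:
--     return (_run(_TABLE1, codes), _run(_TABLE2, codes))
-- ===== Notes on version B (the rewrite author's own statement) =====
-- stated objective: idiomatic
-- what changed: Replaces the two coordinate-walking simulations (Position row/column arithmetic with clamping resp. None-checking against a padded grid) by transition tables precomputed from layout strings, mapping each key character and move directly to the next key, so the loops track only the current key character.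
import Mathlib
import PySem

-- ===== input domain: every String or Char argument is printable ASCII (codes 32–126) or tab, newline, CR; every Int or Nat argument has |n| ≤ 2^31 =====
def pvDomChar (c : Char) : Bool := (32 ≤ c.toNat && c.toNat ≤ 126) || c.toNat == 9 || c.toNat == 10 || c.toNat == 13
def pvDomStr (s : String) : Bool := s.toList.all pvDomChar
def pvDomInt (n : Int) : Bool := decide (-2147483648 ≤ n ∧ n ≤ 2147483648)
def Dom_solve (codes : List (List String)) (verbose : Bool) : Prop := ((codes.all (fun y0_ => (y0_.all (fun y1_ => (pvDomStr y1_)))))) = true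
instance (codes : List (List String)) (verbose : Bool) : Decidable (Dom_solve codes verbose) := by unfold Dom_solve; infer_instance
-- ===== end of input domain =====

-- B replaces the two coordinate-walking simulations by precomputed key→(move→key) transition
-- tables built from layout strings, tracking only the current key character (objective: idiomatic).

-- ===== PORT A =====
-- part-1 step: clamp the row/column to the 3×3 grid
def stepA1 (m : String) (p : Int × Int) : Int × Int :=
  if m = "U" then (if 0 < p.1 then (p.1 - 1, p.2) else p)
  else if m = "D" then (if p.1 < 2 then (p.1 + 1, p.2) else p)
  else if m = "R" then (if p.2 < 2 then (p.1, p.2 + 1) else p)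
  else if m = "L" then (if 0 < p.2 then (p.1, p.2 - 1) else p)
  else p  -- Python: raise ValueError — such moves are excluded by Pre_solve

def pos_to_key (p : Int × Int) : String :=
  match PySem.Str.pyGet? "123456789" (p.1 * 3 + p.2) with
  | some c => String.singleton c
  | none => ""  -- IndexError: unreachable for positions the loop produces

def KEYPAD : List (List (Option String)) :=
  [[none, none, none, none, none, none, none],
   [none, none, none, some "1", none, none, none],
   [none, none, some "2", some "3", some "4", none, none],
   [none, some "5", some "6", some "7", some "8", some "9", none],
   [none, none, some "A", some "B", some "C", none, none],
   [none, none, none, some "D", none, none, none],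
   [none, none, none, none, none, none, none]]

def update_pos (m : String) (p : Int × Int) : Int × Int :=
  if m = "U" then (p.1 - 1, p.2)
  else if m = "D" then (p.1 + 1, p.2)
  else if m = "L" then (p.1, p.2 - 1)
  else if m = "R" then (p.1, p.2 + 1)
  else p  -- Python: raise ValueError — excluded by Pre_solve

-- KEYPAD[r][c] (indices always in range for reachable positions; getD covers the port's totality)
def keyAt2 (p : Int × Int) : Option String :=
  (PySem.List.pyGet? ((PySem.List.pyGet? KEYPAD p.1).getD []) p.2).getD none

-- part-2 step: move, keep the new position only if it lands on a truthy key
def stepA2 (m : String) (p : Int × Int) : Int × Int :=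
  let np := update_pos m p
  match keyAt2 np with
  | some s => if s = "" then p else np
  | none => p

def solve (codes : List (List String)) (verbose : Bool) : String × String :=
  let st1 := codes.foldl (fun st code =>
      let p := code.foldl (fun p m => stepA1 m p) st.1
      (p, st.2 ++ [pos_to_key p])) (((1 : Int), (1 : Int)), ([] : List String))
  let st2 := codes.foldl (fun st code =>
      let p := code.foldl (fun p m => stepA2 m p) st.1
      (p, st.2 ++ [(keyAt2 p).getD ""])) (((3 : Int), (1 : Int)), ([] : List String))
  (PySem.Str.join "" st1.2, PySem.Str.join "" st2.2)

-- ===== PORT B =====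
def LAYOUT1 : List String := ["123", "456", "789"]
def LAYOUT2 : List String := ["  1  ", " 234 ", "56789", " ABC ", "  D  "]
def DELTAS : List (String × (Int × Int)) := [("U", (-1, 0)), ("D", (1, 0)), ("L", (0, -1)), ("R", (0, 1))]

def buildTable (layout : List String) : PySem.Dict String (PySem.Dict String String) :=
  let spots : PySem.Dict String (Int × Int) :=
    (PySem.List.enumerate layout).foldl (fun d rr =>
      (PySem.List.enumerate rr.2.toList).foldl (fun d cc =>
        if cc.2 ≠ ' ' then d.insert (String.singleton cc.2) (rr.1, cc.1) else d) d)
      PySem.Dict.empty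
  spots.items.foldl (fun t kv =>
    let sub : PySem.Dict String String := DELTAS.foldl (fun s md =>
      let nr := kv.2.1 + md.2.1
      let nc := kv.2.2 + md.2.2
      let row := (PySem.List.pyGet? layout nr).getD ""  -- only read when the bound check holds
      let hit := decide (0 ≤ nr) && decide (nr < (layout.length : Int)) &&
                 decide (0 ≤ nc) && decide (nc < (row.toList.length : Int)) &&
                 ((PySem.Str.pyGet? row nc).getD ' ' != ' ')
      s.insert md.1 (if hit then String.singleton ((PySem.Str.pyGet? row nc).getD ' ') else kv.1))
      PySem.Dict.empty
    t.insert kv.1 sub) PySem.Dict.empty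

def TABLE1 : PySem.Dict String (PySem.Dict String String) := buildTable LAYOUT1
def TABLE2 : PySem.Dict String (PySem.Dict String String) := buildTable LAYOUT2

def stepB (t : PySem.Dict String (PySem.Dict String String)) (cur m : String) : String :=
  match t.get? cur with
  | some sub =>
    match sub.get? m with
    | some k => k
    | none => cur  -- Python: raise ValueError — excluded by Pre_solve
  | none => cur    -- unreachable: cur is always a table key

def runTable (t : PySem.Dict String (PySem.Dict String String)) (codes : List (List String)) : String :=
  let st := codes.foldl (fun st code =>
      let cur := code.foldl (fun cur m => stepB t cur m) st.1
      (cur, st.2 ++ [cur])) ("5", ([] : List String))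
  PySem.Str.join "" st.2

def solve_alt (codes : List (List String)) (verbose : Bool) : String × String :=
  (runTable TABLE1 codes, runTable TABLE2 codes)

-- ===== PRECONDITION & SPEC =====
-- Pre_: every move is one of "U"/"D"/"L"/"R" — on anything else Python A raises ValueError.
def Pre_solve (codes : List (List String)) (verbose : Bool) : Prop :=
  ∀ code ∈ codes, ∀ m ∈ code, m = "U" ∨ m = "D" ∨ m = "L" ∨ m = "R"
instance (codes : List (List String)) (verbose : Bool) : Decidable (Pre_solve codes verbose) := by unfold Pre_solve; infer_instance

def pvWitness_solve : List (List String) × Bool := ([["U", "U", "L"], ["D", "R", "R", "R"]], false)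

def Spec_solve (codes : List (List String)) (verbose : Bool) (out : String × String) : Prop := out = solve_alt codes verbose
instance (codes : List (List String)) (verbose : Bool) (out : String × String) : Decidable (Spec_solve codes verbose out) := by unfold Spec_solve; infer_instance

-- ===== CLAIM (what is proved, stated in full; the proofs are below) =====
def Claim_equal_solve : Prop := ∀ (codes : List (List String)) (verbose : Bool), Dom_solve codes verbose → Pre_solve codes verbose → Spec_solve codes verbose (solve codes verbose)

-- ===== LEMMAS AND PROOFS =====
def M4 : List String := ["U", "D", "L", "R"]

-- pairing of A's coordinates with B's key character, keypad 1
def R1 : List ((Int × Int) × String) :=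
  [((0,0),"1"), ((0,1),"2"), ((0,2),"3"),
   ((1,0),"4"), ((1,1),"5"), ((1,2),"6"),
   ((2,0),"7"), ((2,1),"8"), ((2,2),"9")]

-- pairing for keypad 2
def R2 : List ((Int × Int) × String) :=
  [((1,3),"1"), ((2,2),"2"), ((2,3),"3"), ((2,4),"4"),
   ((3,1),"5"), ((3,2),"6"), ((3,3),"7"), ((3,4),"8"), ((3,5),"9"),
   ((4,2),"A"), ((4,3),"B"), ((4,4),"C"), ((5,3),"D")]

theorem foldl_corr {α β : Type} (R : List (α × β)) (fA : α → String → α) (fB : β → String → β)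
    (h : ∀ m ∈ M4, ∀ pk ∈ R, (fA pk.1 m, fB pk.2 m) ∈ R) :
    ∀ (code : List String), (∀ m ∈ code, m ∈ M4) → ∀ p k, (p, k) ∈ R →
      (code.foldl fA p, code.foldl fB k) ∈ R := by
  intro code
  induction code with
  | nil => intro _ p k hpk; simpa using hpk
  | cons m rest ih =>
    intro hc p k hpk
    simp only [List.foldl_cons]
    exact ih (fun x hx => hc x (List.mem_cons_of_mem _ hx))
      (fA p m) (fB k m) (h m (hc m (List.mem_cons_self)) (p, k) hpk)

theorem outer_corr {α β : Type} (R : List (α × β)) (fA : α → String → α) (fB : β → String → β)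
    (outA : α → String) (outB : β → String)
    (hstep : ∀ m ∈ M4, ∀ pk ∈ R, (fA pk.1 m, fB pk.2 m) ∈ R)
    (hout : ∀ pk ∈ R, outA pk.1 = outB pk.2) :
    ∀ (codes : List (List String)), (∀ code ∈ codes, ∀ m ∈ code, m ∈ M4) →
      ∀ p k (acc : List String), (p, k) ∈ R →
      (codes.foldl (fun st code =>
          let p := code.foldl fA st.1
          (p, st.2 ++ [outA p])) (p, acc)).2
        = (codes.foldl (fun st code =>
          let c := code.foldl fB st.1
          (c, st.2 ++ [outB c])) (k, acc)).2 := by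
  intro codes
  induction codes with
  | nil => intro _ p k acc _; rfl
  | cons code rest ih =>
    intro hc p k acc hpk
    have hmem := foldl_corr R fA fB hstep code (hc code (List.mem_cons_self)) p k hpk
    simp only [List.foldl_cons]
    have hkey := hout _ hmem
    rw [hkey]
    exact ih (fun c hcm => hc c (List.mem_cons_of_mem _ hcm)) _ _ _ hmem

theorem step1_corr : ∀ m ∈ M4, ∀ pk ∈ R1, (stepA1 m pk.1, stepB TABLE1 pk.2 m) ∈ R1 := by decide
theorem out1_corr : ∀ pk ∈ R1, pos_to_key pk.1 = pk.2 := by decide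
theorem step2_corr : ∀ m ∈ M4, ∀ pk ∈ R2, (stepA2 m pk.1, stepB TABLE2 pk.2 m) ∈ R2 := by decide
theorem out2_corr : ∀ pk ∈ R2, (keyAt2 pk.1).getD "" = pk.2 := by decide

-- ===== VERDICT (by name: the statement is the Claim_ definition above) =====
theorem solve_spec : Claim_equal_solve := by
  intro codes verbose _ hpre
  have hm : ∀ code ∈ codes, ∀ m ∈ code, m ∈ M4 := by
    intro code hc m hmc
    rcases hpre code hc m hmc with h | h | h | h <;> simp [M4, h]
  show solve codes verbose = solve_alt codes verbose
  unfold solve solve_alt runTable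
  have h1 := outer_corr R1 (fun p m => stepA1 m p) (fun c m => stepB TABLE1 c m)
    pos_to_key id step1_corr out1_corr codes hm ((1 : Int), (1 : Int)) "5" [] (by decide)
  have h2 := outer_corr R2 (fun p m => stepA2 m p) (fun c m => stepB TABLE2 c m)
    (fun p => (keyAt2 p).getD "") id step2_corr out2_corr codes hm ((3 : Int), (1 : Int)) "5" [] (by decide)
  simp only [id] at h1 h2
  simp only [h1, h2]
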